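-- pv_equiv track=rewrite | github.com/janschachtschabel/Volltextextraktion-Selenium-MD | app/converter.py | enhance_table_structure
-- ===== SOURCE A (Python) =====
-- def enhance_table_structure(text: str) -> str:
--     """Enhance table structure preservation in markdown."""
--     lines = text.split('\n')
--     enhanced_lines = []
--     in_table = False
--
--     for line in lines:
--         # Detect potential table rows (multiple | characters)
--         if '|' in line and line.count('|') >= 2:
--             if not in_table:
--                 # Starting a new table - add header separator if missing
--                 in_table = True
--                 enhanced_lines.append(line)
--                 # Check if next line is separator, if not add one
--                 if len(enhanced_lines) > 0:
--                     cells = line.split('|')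
--                     separator = '|' + '|'.join(['---' for _ in range(len(cells)-1)]) + '|'
--                     enhanced_lines.append(separator)
--             else:
--                 enhanced_lines.append(line)
--         else:
--             if in_table:
--                 # End of table
--                 in_table = False
--                 enhanced_lines.append('')  # Add blank line after table
--             enhanced_lines.append(line)
--
--     return '\n'.join(enhanced_lines)
-- ===== SOURCE B (Python) =====
-- from itertools import groupby
--
--
-- def _is_table_row(line: str) -> bool:
--     return '|' in line and line.count('|') >= 2
--
--
-- def enhance_table_structure(text: str) -> str:
--     """Enhance table structure preservation in markdown (run-based rewrite)."""
--     out = []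
--     prev_was_table = False
--     for is_table, group in groupby(text.split('\n'), key=_is_table_row):
--         run = list(group)
--         if is_table:
--             first = run[0]
--             out.append(first)
--             out.append('|' + '|'.join(['---'] * (len(first.split('|')) - 1)) + '|')
--             out.extend(run[1:])
--         else:
--             if prev_was_table:
--                 out.append('')
--             out.extend(run)
--         prev_was_table = is_table
--     return '\n'.join(out)
-- ===== Notes on version B (the rewrite author's own statement) =====
-- stated objective: alternative
-- what changed: Replaces A's per-line state machine (an in_table flag mutated inside one loop over lines) by a run-based decomposition: lines are grouped into maximal table / non-table runs with itertools.groupby, each table run emits its head, the dash separator row and its tail, and a non-table run is prefixed by one blank line iff the previous run was a table.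
import Mathlib
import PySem

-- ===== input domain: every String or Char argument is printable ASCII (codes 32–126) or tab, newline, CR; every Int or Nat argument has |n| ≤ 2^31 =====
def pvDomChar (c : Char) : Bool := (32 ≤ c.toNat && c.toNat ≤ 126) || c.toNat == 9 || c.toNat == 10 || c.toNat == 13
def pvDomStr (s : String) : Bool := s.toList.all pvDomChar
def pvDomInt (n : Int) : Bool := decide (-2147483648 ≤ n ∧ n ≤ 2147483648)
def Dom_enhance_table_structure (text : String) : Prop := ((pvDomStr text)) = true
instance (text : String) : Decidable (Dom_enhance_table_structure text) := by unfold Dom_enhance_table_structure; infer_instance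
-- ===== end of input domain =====

-- B is an alternative decomposition of A (runs of table / non-table lines instead of a
-- per-line in_table flag); same asymptotic cost, equal output on every input.

-- helpers shared by both ports: the table-row test and the separator row built from a table line
def pvIsRow (line : String) : Bool :=
  PySem.Str.isIn "|" line && decide (2 ≤ PySem.Str.count line "|")

def pvSep (line : String) : String :=
  let cells := (PySem.Str.split? line "|").getD []
  "|" ++ PySem.Str.join "|" (List.replicate (cells.length - 1) "---") ++ "|"

-- ===== PORT A =====
-- loop body of A, literal: state = (enhanced_lines, in_table)
def pvStepA (st : List String × Bool) (line : String) : List String × Bool :=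
  let enhanced := st.1
  let in_table := st.2
  if pvIsRow line then
    if !in_table then
      let enhanced := enhanced ++ [line]
      let enhanced := if enhanced.length > 0 then enhanced ++ [pvSep line] else enhanced
      (enhanced, true)
    else
      (enhanced ++ [line], true)
  else
    if in_table then
      ((enhanced ++ [""]) ++ [line], false)
    else
      (enhanced ++ [line], false)

def enhance_table_structure (text : String) : String :=
  let lines := (PySem.Str.split? text "\n").getD []
  PySem.Str.join "\n" (lines.foldl pvStepA ([], false)).1

-- ===== PORT B =====
-- run-based recursion (port of the groupby loop): consume one maximal run per step,
-- carrying prev_was_table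
def pvRuns : Bool → List String → List String
  | _, [] => []
  | prev, l :: ls =>
    if pvIsRow l then
      l :: pvSep l :: (ls.takeWhile pvIsRow ++ pvRuns true (ls.dropWhile pvIsRow))
    else
      (if prev then [""] else []) ++
        (l :: (ls.takeWhile (fun x => !pvIsRow x) ++
               pvRuns false (ls.dropWhile (fun x => !pvIsRow x))))
termination_by _ ls => ls.length
decreasing_by
  · exact Nat.lt_succ_of_le (List.length_dropWhile_le _ _)
  · exact Nat.lt_succ_of_le (List.length_dropWhile_le _ _)

def enhance_table_structure_alt (text : String) : String :=
  PySem.Str.join "\n" (pvRuns false ((PySem.Str.split? text "\n").getD []))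

-- ===== PRECONDITION & SPEC =====
def Spec_enhance_table_structure (text : String) (out : String) : Prop := out = enhance_table_structure_alt text
instance (text : String) (out : String) : Decidable (Spec_enhance_table_structure text out) := by unfold Spec_enhance_table_structure; infer_instance

-- ===== CLAIM (what is proved, stated in full; the proofs are below) =====
def Claim_equal_enhance_table_structure : Prop := ∀ (text : String), Dom_enhance_table_structure text → Spec_enhance_table_structure text (enhance_table_structure text)

-- ===== LEMMAS AND PROOFS =====

-- line-by-line unrolling of A's loop, without the accumulator
def pvAux : Bool → List String → List String
  | _, [] => []
  | t, l :: ls =>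
    if pvIsRow l then
      (if t then [l] else [l, pvSep l]) ++ pvAux true ls
    else
      (if t then ["", l] else [l]) ++ pvAux false ls

theorem pvFoldA (ls : List String) : ∀ (acc : List String) (t : Bool),
    (ls.foldl pvStepA (acc, t)).1 = acc ++ pvAux t ls := by
  induction ls with
  | nil => intro acc t; simp [pvAux]
  | cons l ls ih =>
    intro acc t
    by_cases hr : pvIsRow l
    · cases t <;> simp [pvStepA, pvAux, hr, ih]
    · cases t <;> simp [pvStepA, pvAux, hr, ih]

theorem pvAux_run_true (ls : List String) :
    pvAux true ls = ls.takeWhile pvIsRow ++ pvAux true (ls.dropWhile pvIsRow) := by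
  induction ls with
  | nil => simp
  | cons l ls ih =>
    by_cases hr : pvIsRow l
    · simp [pvAux, hr, ih]
    · simp [hr]

theorem pvAux_run_false (ls : List String) :
    pvAux false ls = ls.takeWhile (fun x => !pvIsRow x) ++
      pvAux false (ls.dropWhile (fun x => !pvIsRow x)) := by
  induction ls with
  | nil => simp
  | cons l ls ih =>
    by_cases hr : pvIsRow l
    · simp [hr]
    · simp [pvAux, hr, ih]

theorem pvRuns_eq_aux (n : Nat) : ∀ (ls : List String) (t : Bool), ls.length ≤ n →
    (t = true → ∀ h, ls.head? = some h → pvIsRow h = false) →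
    pvRuns t ls = pvAux t ls := by
  induction n with
  | zero =>
    intro ls t hlen _
    have : ls = [] := List.eq_nil_of_length_eq_zero (Nat.le_zero.mp hlen)
    subst this; simp [pvRuns, pvAux]
  | succ n ih =>
    intro ls t hlen hhead
    cases ls with
    | nil => simp [pvRuns, pvAux]
    | cons l ls =>
      have hls : ls.length ≤ n := Nat.le_of_succ_le_succ hlen
      by_cases hr : pvIsRow l
      · -- table run: t must be false
        have ht : t = false := by
          cases t with
          | false => rfl
          | true => exact absurd (hhead rfl l rfl) (by simp [hr])
        subst ht
        have hdrop : pvRuns true (ls.dropWhile pvIsRow) = pvAux true (ls.dropWhile pvIsRow) := by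
          apply ih _ _ (Nat.le_trans (List.length_dropWhile_le _ _) hls)
          intro _ h hh
          have := List.head?_dropWhile_not pvIsRow ls
          rw [hh] at this
          simpa using this
        simp only [pvRuns, pvAux, hr, if_pos, Bool.false_eq_true]
        rw [hdrop, ← pvAux_run_true]
        simp
      · -- non-table run
        have hdrop : pvRuns false (ls.dropWhile (fun x => !pvIsRow x)) =
            pvAux false (ls.dropWhile (fun x => !pvIsRow x)) := by
          apply ih _ _ (Nat.le_trans (List.length_dropWhile_le _ _) hls)
          intro hf; exact absurd hf (by simp)
        simp only [pvRuns, pvAux, hr]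
        rw [hdrop, ← pvAux_run_false]
        cases t <;> simp

-- ===== VERDICT (by name: the statement is the Claim_ definition above) =====
theorem enhance_table_structure_spec : Claim_equal_enhance_table_structure := by
  intro text _
  unfold Spec_enhance_table_structure enhance_table_structure enhance_table_structure_alt
  dsimp only
  rw [pvFoldA, pvRuns_eq_aux ((PySem.Str.split? text "\n").getD []).length _ _ (Nat.le_refl _)
      (by intro h; simp at h)]
  simp
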